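-- pv_equiv track=rewrite | github.com/Evelynsuzarte/teste_acedata | main.py | exercicio3_a
-- ===== SOURCE A (Python) =====
-- def exercicio3_a(n):
--     if n == 0:
--         return [0]
--     elif n == 1:
--         return [0, 1]
--     else:
--         sequencia = exercicio3_a(n - 1)
--         posicao_ultimo = len(sequencia)
--         if sequencia[posicao_ultimo-1] % 2 == 0:
--             sequencia.append(sequencia[-1] + sequencia[-2] + sequencia[-3] )
--         else:
--             sequencia.append(sequencia[-1] + sequencia[-2])
--         return sequencia
-- ===== SOURCE B (Python) =====
-- def exercicio3_a(n):
--     seq = [0]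
--     if n >= 1:
--         seq.append(1)
--     for _ in range(n - 1):
--         if seq[-1] % 2 == 0:
--             seq.append(seq[-1] + seq[-2] + seq[-3])
--         else:
--             seq.append(seq[-1] + seq[-2])
--     return seq
-- ===== Notes on version B (the rewrite author's own statement) =====
-- stated objective: simpler
-- what changed: Replaces the recursion that rebuilds the whole prefix list on every call by a single iterative loop that appends each new term; Pre_ excludes negative n, on which A recurses forever and raises RecursionError.
import Mathlib
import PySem

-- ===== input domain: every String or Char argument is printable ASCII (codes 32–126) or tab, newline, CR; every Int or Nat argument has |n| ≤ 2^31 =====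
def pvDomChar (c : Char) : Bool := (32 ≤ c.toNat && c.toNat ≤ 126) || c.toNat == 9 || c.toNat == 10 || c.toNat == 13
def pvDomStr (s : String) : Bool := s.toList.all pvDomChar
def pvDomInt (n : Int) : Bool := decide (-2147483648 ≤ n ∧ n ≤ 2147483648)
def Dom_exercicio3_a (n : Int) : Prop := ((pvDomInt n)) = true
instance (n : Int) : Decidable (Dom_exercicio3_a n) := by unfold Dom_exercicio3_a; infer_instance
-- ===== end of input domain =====

-- B replaces A's recursion (which rebuilds the prefix list on every call) by one iterative
-- append loop; objective: simpler.

-- ===== PORT A =====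
-- A recurses on n-1; for n < 0 the Python recursion never terminates (RecursionError),
-- so the port recurses on n.toNat and is only claimed on Pre_ (0 ≤ n).
def exercicio3_aRec : Nat → List Int
  | 0 => [0]
  | 1 => [0, 1]
  | (k+2) =>
    let sequencia := exercicio3_aRec (k+1)
    let posicao_ultimo : Int := sequencia.length
    if PySem.Int.mod (PySem.List.pyGetD sequencia (posicao_ultimo - 1) 0) 2 == 0 then
      sequencia ++ [PySem.List.pyGetD sequencia (-1) 0 + PySem.List.pyGetD sequencia (-2) 0
                    + PySem.List.pyGetD sequencia (-3) 0]
    else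
      sequencia ++ [PySem.List.pyGetD sequencia (-1) 0 + PySem.List.pyGetD sequencia (-2) 0]

def exercicio3_a (n : Int) : List Int :=
  if n < 0 then [] else exercicio3_aRec n.toNat

-- ===== PORT B =====
-- one iteration of B's loop: append the next term to seq
def exercicio3_aStep (seq : List Int) : List Int :=
  if PySem.Int.mod (PySem.List.pyGetD seq (-1) 0) 2 == 0 then
    seq ++ [PySem.List.pyGetD seq (-1) 0 + PySem.List.pyGetD seq (-2) 0
            + PySem.List.pyGetD seq (-3) 0]
  else
    seq ++ [PySem.List.pyGetD seq (-1) 0 + PySem.List.pyGetD seq (-2) 0]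

def exercicio3_a_alt (n : Int) : List Int :=
  let seq : List Int := [0]
  let seq := if 1 ≤ n then seq ++ [1] else seq
  (List.range (n - 1).toNat).foldl (fun s _ => exercicio3_aStep s) seq

-- ===== PRECONDITION & SPEC =====
-- Pre_ excludes n < 0, on which Python A recurses forever and raises RecursionError.
def Pre_exercicio3_a (n : Int) : Prop := 0 ≤ n
instance (n : Int) : Decidable (Pre_exercicio3_a n) := by unfold Pre_exercicio3_a; infer_instance
def pvWitness_exercicio3_a : Int := 5

def Spec_exercicio3_a (n : Int) (out : List Int) : Prop := out = exercicio3_a_alt n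
instance (n : Int) (out : List Int) : Decidable (Spec_exercicio3_a n out) := by unfold Spec_exercicio3_a; infer_instance

-- ===== CLAIM (what is proved, stated in full; the proofs are below) =====
def Claim_equal_exercicio3_a : Prop := ∀ (n : Int), Dom_exercicio3_a n → Pre_exercicio3_a n → Spec_exercicio3_a n (exercicio3_a n)

-- ===== LEMMAS AND PROOFS =====

def pvFoldB (k : Nat) : List Int :=
  (List.range k).foldl (fun s _ => exercicio3_aStep s) [0, 1]

theorem pvFoldB_succ (k : Nat) : pvFoldB (k+1) = exercicio3_aStep (pvFoldB k) := by
  simp [pvFoldB, List.range_succ]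

theorem pvGetD_last (l : List Int) (x d : Int) :
    PySem.List.pyGetD (l ++ [x]) (((l ++ [x]).length : Int) - 1) d = x := by
  have h1 : (((l ++ [x]).length : Int) - 1) = ((l.length : Nat) : Int) := by
    simp only [List.length_append, List.length_cons, List.length_nil]; push_cast; omega
  rw [h1, PySem.List.pyGetD_natCast]
  simp

-- A's step body equals B's step on any list of shape l ++ [x] (the guard index len-1 vs -1)
theorem pvStep_eq (l : List Int) (x : Int) :
    (let sequencia := l ++ [x]
     let posicao_ultimo : Int := sequencia.length
     if PySem.Int.mod (PySem.List.pyGetD sequencia (posicao_ultimo - 1) 0) 2 == 0 then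
       sequencia ++ [PySem.List.pyGetD sequencia (-1) 0 + PySem.List.pyGetD sequencia (-2) 0
                     + PySem.List.pyGetD sequencia (-3) 0]
     else
       sequencia ++ [PySem.List.pyGetD sequencia (-1) 0 + PySem.List.pyGetD sequencia (-2) 0])
    = exercicio3_aStep (l ++ [x]) := by
  simp only [exercicio3_aStep, pvGetD_last, PySem.List.pyGetD_neg_one_append_singleton]

-- invariant: A's recursion at k+1 equals B's fold after k steps, and the state ends in a last element
theorem pvMain (k : Nat) :
    exercicio3_aRec (k+1) = pvFoldB k ∧ ∃ l x, pvFoldB k = l ++ [x] := by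
  induction k with
  | zero => exact ⟨by simp [pvFoldB]; rfl, ⟨[0], 1, by simp [pvFoldB]⟩⟩
  | succ k ih =>
    obtain ⟨hA, l, x, hshape⟩ := ih
    have hstep : exercicio3_aRec (k+1+1) = exercicio3_aStep (pvFoldB k) := by
      show exercicio3_aRec (k+2) = _
      rw [exercicio3_aRec, hA, hshape, pvStep_eq]
    refine ⟨by rw [pvFoldB_succ, hstep], ?_⟩
    rw [pvFoldB_succ, hshape, exercicio3_aStep]
    split_ifs <;> exact ⟨_, _, rfl⟩

-- ===== VERDICT (by name: the statement is the Claim_ definition above) =====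
theorem exercicio3_a_spec : Claim_equal_exercicio3_a := by
  intro n _ hpre
  unfold Spec_exercicio3_a exercicio3_a
  unfold Pre_exercicio3_a at hpre
  rw [if_neg (by omega)]
  by_cases h0 : n = 0
  · subst h0; decide
  · have halt : exercicio3_a_alt n = pvFoldB (n - 1).toNat := by
      show List.foldl (fun s _ => exercicio3_aStep s)
            (if 1 ≤ n then [0] ++ [1] else [0]) (List.range (n - 1).toNat) = _
      rw [if_pos (show (1:Int) ≤ n by omega)]
      rfl
    have hk : n.toNat = (n - 1).toNat + 1 := by omega
    rw [halt, hk, (pvMain (n - 1).toNat).1]
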